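-- pv_equiv track=rewrite | github.com/paiml/depyler | examples/hard_priority_encoding.py | one_hot_decode
-- ===== SOURCE A (Python) =====
-- def one_hot_decode(value: int, num_bits: int) -> int:
--     """Decode one-hot value to position. Returns -1 if not valid one-hot."""
--     count: int = 0
--     pos: int = -1
--     i: int = 0
--     while i < num_bits:
--         if (value >> i) & 1 == 1:
--             count = count + 1
--             pos = i
--         i = i + 1
--     if count == 1:
--         return pos
--     return -1
-- ===== SOURCE B (Python) =====
-- def one_hot_decode(value: int, num_bits: int) -> int:
--     """Decode one-hot value to position. Returns -1 if not valid one-hot."""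
--     if num_bits <= 0:
--         return -1
--     m = value & ((1 << num_bits) - 1)
--     if m != 0 and m & (m - 1) == 0:
--         return m.bit_length() - 1
--     return -1
-- ===== Notes on version B (the rewrite author's own statement) =====
-- stated objective: faster
-- what changed: Replaces the per-bit scanning loop with O(1) bit tricks: mask value to num_bits, test one-hot via m & (m-1) == 0, and read the position with bit_length.
import Mathlib
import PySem

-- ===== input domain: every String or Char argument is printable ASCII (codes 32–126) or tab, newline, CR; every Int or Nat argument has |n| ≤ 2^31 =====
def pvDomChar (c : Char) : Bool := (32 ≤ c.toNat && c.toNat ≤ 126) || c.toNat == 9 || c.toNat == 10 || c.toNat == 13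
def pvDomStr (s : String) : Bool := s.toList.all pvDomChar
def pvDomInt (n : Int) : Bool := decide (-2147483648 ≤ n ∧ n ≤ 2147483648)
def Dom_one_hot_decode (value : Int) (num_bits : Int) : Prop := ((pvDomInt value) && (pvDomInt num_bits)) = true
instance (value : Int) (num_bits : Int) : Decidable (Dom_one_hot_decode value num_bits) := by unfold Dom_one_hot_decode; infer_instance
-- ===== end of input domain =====

-- B replaces A's per-bit scanning loop by O(1) bit tricks (mask, m&(m-1) power-of-two test, bit_length); equivalence of return values is proved for all inputs.

-- ===== PORT A =====
-- while i < num_bits: test bit i of value, counting set bits and remembering the last position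
def oneHotLoopA (value : Int) (num_bits : Int) (count : Int) (pos : Int) (i : Int) : Int × Int :=
  if _h : i < num_bits then
    if PySem.Int.band (value >>> i.toNat) 1 = 1 then
      oneHotLoopA value num_bits (count + 1) i (i + 1)
    else
      oneHotLoopA value num_bits count pos (i + 1)
  else (count, pos)
termination_by (num_bits - i).toNat
decreasing_by all_goals omega

def one_hot_decode (value : Int) (num_bits : Int) : Int :=
  let cp := oneHotLoopA value num_bits 0 (-1) 0
  if cp.1 = 1 then cp.2 else -1

-- ===== PORT B =====
def one_hot_decode_alt (value : Int) (num_bits : Int) : Int :=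
  if num_bits ≤ 0 then -1
  else
    let m := PySem.Int.band value (((1 : Int) <<< num_bits.toNat) - 1)
    if m ≠ 0 ∧ PySem.Int.band m (m - 1) = 0 then
      (PySem.Int.bitLength m : Int) - 1
    else -1

-- ===== PRECONDITION & SPEC =====
def Spec_one_hot_decode (value : Int) (num_bits : Int) (out : Int) : Prop := out = one_hot_decode_alt value num_bits
instance (value : Int) (num_bits : Int) (out : Int) : Decidable (Spec_one_hot_decode value num_bits out) := by unfold Spec_one_hot_decode; infer_instance

-- ===== CLAIM (what is proved, stated in full; the proofs are below) =====
def Claim_equal_one_hot_decode : Prop := ∀ (value : Int) (num_bits : Int), Dom_one_hot_decode value num_bits → Spec_one_hot_decode value num_bits (one_hot_decode value num_bits)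

-- ===== LEMMAS AND PROOFS =====

-- window halving: (x / 2) % 2^f = (x % 2^(f+1)) / 2
lemma win_half (x : Int) (f : Nat) :
    (x / 2) % 2 ^ f = (x % 2 ^ (f + 1)) / 2 := by
  set K : Int := 2 ^ f with hK
  have hKpos : 0 < K := by positivity
  have h2K : (2 : Int) ^ (f + 1) = 2 * K := by rw [hK]; ring
  rw [h2K]
  set r : Int := x % (2 * K) with hr
  set q : Int := x / (2 * K) with hq
  have hrb : 0 ≤ r ∧ r < 2 * K := ⟨Int.emod_nonneg x (by omega), Int.emod_lt_of_pos x (by omega)⟩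
  have hx : x = r + 2 * (K * q) := by
    have := Int.mul_ediv_add_emod x (2 * K); push_cast at this ⊢; linarith [this]
  have hdiv : x / 2 = r / 2 + K * q := by
    rw [hx]; rw [Int.add_mul_ediv_left _ _ (by omega : (2:Int) ≠ 0)]
  rw [hdiv]
  have : (r / 2 + K * q) % K = r / 2 % K := Int.add_mul_emod_self_left (r / 2) K q
  rw [this, Int.emod_eq_of_lt (by omega) (by omega)]

-- parity of the window equals parity of x
lemma win_par (x : Int) (f : Nat) :
    (x % 2 ^ (f + 1)) % 2 = x % 2 := by
  exact Int.emod_emod_of_dvd x ⟨2 ^ f, by ring⟩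

-- the loop computes (count + popcount of window, position of the window's top bit)
lemma oneHotLoopA_inv (v n : Int) :
    ∀ (f : Nat) (i c p : Int), 0 ≤ i → (n - i).toNat = f →
      oneHotLoopA v n c p i =
        (c + (PySem.Int.bitCount ((v >>> i.toNat) % 2 ^ f) : Int),
         if (v >>> i.toNat) % 2 ^ f = 0 then p
         else i + (PySem.Int.bitLength ((v >>> i.toNat) % 2 ^ f) : Int) - 1) := by
  intro f
  induction f with
  | zero =>
    intro i c p hi hf
    have hni : ¬ i < n := by omega
    rw [oneHotLoopA]
    simp [hni]
  | succ f ih =>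
    intro i c p hi hf
    have hin : i < n := by omega
    set x : Int := v >>> i.toNat with hx
    set w : Int := x % 2 ^ (f + 1) with hw
    have hwnn : 0 ≤ w := Int.emod_nonneg x (by positivity)
    have hx' : v >>> (i + 1).toNat = x / 2 := by
      have h1 : (i + 1).toNat = i.toNat + 1 := by omega
      rw [h1, Int.shiftRight_add, ← hx, Int.shiftRight_eq_div_pow]
      norm_num
    have hw' : (v >>> (i + 1).toNat) % 2 ^ f = w / 2 := by
      rw [hx', win_half, hw]
    have hrec := ih (i + 1) (c + 1) i (by omega) (by omega)
    have hrec' := ih (i + 1) c p (by omega) (by omega)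
    have hband : PySem.Int.band x 1 = x % 2 := by
      rw [PySem.Int.band_one, PySem.Int.mod_eq_emod_of_pos (by omega)]
    have hpar : w % 2 = x % 2 := win_par x f
    have hxm2 : x % 2 = 0 ∨ x % 2 = 1 := by omega
    rw [oneHotLoopA]
    simp only [hin, dite_true, ← hx, hband]
    rcases hxm2 with h0 | h1
    · -- bit not set
      have hne : ¬ (x % 2 = 1) := by omega
      simp only [hne, if_false]
      rw [hrec', hw']
      have hweven : w % 2 = 0 := by omega
      have hwz : w = 0 ↔ w / 2 = 0 := by omega
      by_cases hw0 : w = 0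
      · have hd : w / 2 = 0 := by omega
        simp [hw0]
      · have hwpos : 0 < w := by omega
        have hcnt := PySem.Int.bitCount_of_pos hwpos
        have hlen := PySem.Int.bitLength_of_pos hwpos
        rw [PySem.Int.mod_eq_emod_of_pos (by omega)] at hcnt
        rw [PySem.Int.floordiv_eq_ediv_of_pos (by omega)] at hcnt hlen
        have hwd0 : ¬ (w / 2 = 0) := by omega
        simp only [hw0, if_false, hwd0, Prod.mk.injEq]
        refine ⟨?_, ?_⟩
        · rw [hcnt, hweven]; push_cast; ring
        · rw [hlen]; push_cast; ring
    · -- bit set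
      simp only [h1, if_true]
      rw [hrec, hw']
      have hwodd : w % 2 = 1 := by omega
      have hwpos : 0 < w := by omega
      have hw0 : ¬ (w = 0) := by omega
      have hcnt := PySem.Int.bitCount_of_pos hwpos
      have hlen := PySem.Int.bitLength_of_pos hwpos
      rw [PySem.Int.mod_eq_emod_of_pos (by omega)] at hcnt
      rw [PySem.Int.floordiv_eq_ediv_of_pos (by omega)] at hcnt hlen
      simp only [hw0, if_false, Prod.mk.injEq]
      refine ⟨?_, ?_⟩
      · rw [hcnt, hwodd]; push_cast; ring
      · by_cases hwd : w / 2 = 0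
        · have hw1 : w = 1 := by omega
          have hb1 : PySem.Int.bitLength 1 = 1 := by decide
          simp only [hw1, hb1]
          omega
        · simp only [hwd, if_false]
          rw [hlen]; push_cast; ring

-- masking with 2^k - 1 is reduction mod 2^k, also for negative values
lemma band_mask (v : Int) (k : Nat) :
    PySem.Int.band v (2 ^ k - 1) = v % 2 ^ k := by
  have hKpos : 0 < 2 ^ k := Nat.two_pow_pos k
  have hcastK : ((2 ^ k : Nat) : Int) = 2 ^ k := by push_cast; ring
  have hmask : ((2 : Int) ^ k - 1) = (((2 ^ k - 1 : Nat)) : Int) := by omega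
  by_cases hv : 0 ≤ v
  · rw [hmask]
    have hv' : v = (v.toNat : Int) := by omega
    rw [hv']
    rw [PySem.Int.band_natCast]
    rw [Nat.and_two_pow_sub_one_eq_mod]
    push_cast
    rfl
  · -- v < 0: unfold the definition of band
    have hb : (0 : Int) ≤ 2 ^ k - 1 := by omega
    rw [PySem.Int.band]
    simp only [hv, if_false, hb, if_true]
    set u : Nat := (-v - 1).toNat with hu
    have huv : (u : Int) = -v - 1 := by omega
    have hbt : ((2 : Int) ^ k - 1).toNat = 2 ^ k - 1 := by omega
    rw [hbt]
    have hand : (2 ^ k - 1) &&& u = u % 2 ^ k := by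
      rw [Nat.land_comm, Nat.and_two_pow_sub_one_eq_mod]
    rw [hand]
    -- v % 2^k = 2^k - 1 - (u % 2^k)
    have hdm : u = 2 ^ k * (u / 2 ^ k) + u % 2 ^ k := (Nat.div_add_mod u (2 ^ k)).symm
    have hrlt : u % 2 ^ k < 2 ^ k := Nat.mod_lt u hKpos
    have hvexp : v = ((2 : Int) ^ k - 1 - ((u % 2 ^ k : Nat) : Int)) + 2 ^ k * (-((u / 2 ^ k : Nat) : Int) - 1) := by
      have h1 : v = -((u : Int) + 1) := by omega
      have h2 : (u : Int) = 2 ^ k * ((u / 2 ^ k : Nat) : Int) + ((u % 2 ^ k : Nat) : Int) := by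
        exact_mod_cast congrArg (fun x : Nat => (x : Int)) hdm
      rw [h1, h2]; ring
    rw [hvexp, Int.add_mul_emod_self_left, Int.emod_eq_of_lt (by omega) (by omega)]
    omega

-- popcount of a natural number is zero iff it is zero
lemma bitCount_cast_eq_zero (mm : Nat) : PySem.Int.bitCount (mm : Int) = 0 ↔ mm = 0 := by
  induction mm using Nat.strong_induction_on with
  | _ mm ih =>
    rcases Nat.eq_zero_or_pos mm with h0 | hpos
    · simp [h0, PySem.Int.bitCount_zero]
    · rw [PySem.Int.bitCount_natCast hpos]
      constructor
      · intro h
        have h2 : mm % 2 = 0 ∧ PySem.Int.bitCount ((mm / 2 : Nat) : Int) = 0 := by omega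
        have := (ih (mm / 2) (by omega)).mp h2.2
        omega
      · intro h; omega

-- one-hot test over Nat: m & (m-1) = 0 iff popcount m = 1 (for m > 0)
lemma pow2_test (mm : Nat) (hpos : 0 < mm) :
    (mm &&& (mm - 1) = 0 ↔ PySem.Int.bitCount (mm : Int) = 1) := by
  induction mm using Nat.strong_induction_on with
  | _ mm ih =>
    have hcnt := PySem.Int.bitCount_natCast hpos
    have hdiv : (mm &&& (mm - 1)) / 2 = (mm / 2) &&& ((mm - 1) / 2) := Nat.and_div_two
    have hmod : (mm &&& (mm - 1)) % 2 = 0 := by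
      have hb : ((mm &&& (mm - 1)) % 2 = 1) ↔ ((mm % 2 = 1) ∧ ((mm - 1) % 2 = 1)) := by
        simpa using Nat.testBit_and mm (mm - 1) 0
      omega
    rcases Nat.even_or_odd mm with he | ho
    · -- mm even, mm = 2k with k ≥ 1
      have hm2 : mm % 2 = 0 := Nat.even_iff.mp he
      set k : Nat := mm / 2 with hk
      have hkpos : 0 < k := by omega
      have hpred : (mm - 1) / 2 = k - 1 := by omega
      have hx : mm &&& (mm - 1) = 2 * (k &&& (k - 1)) := by
        rw [hpred] at hdiv; omega
      have hih := ih k (by omega) hkpos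
      rw [hx, hcnt, hm2]
      constructor
      · intro h
        have : k &&& (k - 1) = 0 := by omega
        have := hih.mp this
        omega
      · intro h
        have : PySem.Int.bitCount ((k : Nat) : Int) = 1 := by omega
        have := hih.mpr this
        omega
    · -- mm odd, mm = 2k + 1
      have hm2 : mm % 2 = 1 := Nat.odd_iff.mp ho
      set k : Nat := mm / 2 with hk
      have hpred : (mm - 1) / 2 = k := by omega
      have hx : mm &&& (mm - 1) = 2 * k := by
        rw [hpred, Nat.and_self] at hdiv; omega
      rw [hx, hcnt, hm2]
      constructor
      · intro h
        have hk0 : k = 0 := by omega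
        rw [hk0]
        simp [PySem.Int.bitCount_zero]
      · intro h
        have : PySem.Int.bitCount ((k : Nat) : Int) = 0 := by omega
        have := (bitCount_cast_eq_zero k).mp this
        omega

-- one-hot test over Int (nonnegative m)
lemma one_hot_test (m : Int) (hm : 0 ≤ m) :
    (m ≠ 0 ∧ PySem.Int.band m (m - 1) = 0) ↔ PySem.Int.bitCount m = 1 := by
  by_cases h0 : m = 0
  · simp [h0, PySem.Int.bitCount_zero]
  · have hpos : 0 < m := by omega
    have hband : PySem.Int.band m (m - 1) = ((m.toNat &&& (m.toNat - 1) : Nat) : Int) := by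
      have h3 : (m - 1).toNat = m.toNat - 1 := by omega
      rw [PySem.Int.band_of_nonneg (by omega) (by omega), h3]
    have hm' : m = (m.toNat : Int) := by omega
    have hiff := pow2_test m.toNat (by omega)
    constructor
    · intro h
      rw [hband] at h
      rw [hm']
      exact hiff.mp (by exact_mod_cast h.2)
    · intro h
      refine ⟨h0, ?_⟩
      rw [hband]
      rw [hm'] at h
      exact_mod_cast hiff.mpr h

-- ===== VERDICT (by name: the statement is the Claim_ definition above) =====
theorem one_hot_decode_spec : Claim_equal_one_hot_decode := by
  intro v n _
  unfold Spec_one_hot_decode one_hot_decode one_hot_decode_alt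
  have hinv := oneHotLoopA_inv v n n.toNat 0 0 (-1) le_rfl (by omega)
  have h0t : ((0 : Int)).toNat = 0 := rfl
  rw [h0t, Int.shiftRight_zero] at hinv
  by_cases hn : n ≤ 0
  · have hnt : n.toNat = 0 := by omega
    rw [hnt] at hinv
    simp only [pow_zero, Int.emod_one] at hinv
    simp [hinv, hn, PySem.Int.bitCount_zero]
  · simp only [hn, if_false]
    set w : Int := v % 2 ^ n.toNat with hw
    have hwnn : 0 ≤ w := Int.emod_nonneg v (by positivity)
    have hm : PySem.Int.band v ((1 : Int) <<< n.toNat - 1) = w := by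
      rw [Int.shiftLeft_eq, one_mul, band_mask]
    simp only [hm, hinv]
    have hiff := one_hot_test w hwnn
    by_cases hc : PySem.Int.bitCount w = 1
    · have hcond : w ≠ 0 ∧ PySem.Int.band w (w - 1) = 0 := hiff.mpr hc
      rw [if_pos (show (0 : Int) + (PySem.Int.bitCount w : Int) = 1 by rw [hc]; norm_num)]
      rw [if_neg hcond.1, if_pos hcond]
      ring
    · have hcond : ¬ (w ≠ 0 ∧ PySem.Int.band w (w - 1) = 0) := fun h => hc (hiff.mp h)
      rw [if_neg (show ¬ ((0 : Int) + (PySem.Int.bitCount w : Int) = 1) by intro h; apply hc; omega)]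
      rw [if_neg hcond]
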